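-- pv_equiv track=rewrite | github.com/maniSbindra/secure-container-base-image-recommender | src/utils.py | detect_package_manager_from_files
-- ===== SOURCE A (Python) =====
-- from typing import Dict, List, Optional, Tuple
--
-- def detect_package_manager_from_files(file_list: List[str]) -> List[str]:
--     """Detect package managers based on configuration files"""
--
--     managers = []
--
--     file_patterns = {
--         "npm": ["package.json", "package-lock.json"],
--         "yarn": ["yarn.lock"],
--         "pip": ["requirements.txt", "setup.py", "pyproject.toml"],
--         "maven": ["pom.xml"],
--         "gradle": ["build.gradle", "build.gradle.kts"],
--         "composer": ["composer.json"],
--         "gem": ["Gemfile"],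
--         "cargo": ["Cargo.toml"],
--         "go": ["go.mod"],
--     }
--
--     for manager, patterns in file_patterns.items():
--         for pattern in patterns:
--             if any(pattern in f for f in file_list):
--                 managers.append(manager)
--                 break
--
--     return managers
-- ===== SOURCE B (Python) =====
-- def detect_package_manager_from_files(file_list):
--     """Detect package managers based on configuration files"""
--
--     pattern_to_manager = [
--         ("package.json", "npm"),
--         ("package-lock.json", "npm"),
--         ("yarn.lock", "yarn"),
--         ("requirements.txt", "pip"),
--         ("setup.py", "pip"),
--         ("pyproject.toml", "pip"),
--         ("pom.xml", "maven"),
--         ("build.gradle", "gradle"),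
--         ("build.gradle.kts", "gradle"),
--         ("composer.json", "composer"),
--         ("Gemfile", "gem"),
--         ("Cargo.toml", "cargo"),
--         ("go.mod", "go"),
--     ]
--     manager_order = ["npm", "yarn", "pip", "maven", "gradle", "composer", "gem", "cargo", "go"]
--
--     detected = set()
--     for f in file_list:
--         for pattern, manager in pattern_to_manager:
--             if pattern in f:
--                 detected.add(manager)
--
--     return [m for m in manager_order if m in detected]
-- ===== Notes on version B (the rewrite author's own statement) =====
-- stated objective: alternative
-- what changed: A scans the whole file list once per pattern (with an early break per manager); B makes a single pass over the files, building a detected-managers set from a flat pattern-to-manager index, then emits managers with one order-preserving filter over the fixed manager order.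
import Mathlib
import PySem

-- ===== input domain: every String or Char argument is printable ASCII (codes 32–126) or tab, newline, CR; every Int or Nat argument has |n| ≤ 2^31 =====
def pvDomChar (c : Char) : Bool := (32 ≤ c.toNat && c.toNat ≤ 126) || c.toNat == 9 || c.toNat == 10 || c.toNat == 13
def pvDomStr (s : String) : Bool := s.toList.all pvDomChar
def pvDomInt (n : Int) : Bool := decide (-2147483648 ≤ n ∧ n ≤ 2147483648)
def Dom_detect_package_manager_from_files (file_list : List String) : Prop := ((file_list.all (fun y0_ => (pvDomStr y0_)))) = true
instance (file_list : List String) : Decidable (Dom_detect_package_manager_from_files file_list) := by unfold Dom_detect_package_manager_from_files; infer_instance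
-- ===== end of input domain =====

-- B replaces A's per-pattern rescans of the file list by one pass over the files building a
-- detected-managers set from a flat pattern→manager index, then one ordered filter (alternative).

-- ===== PORT A =====
-- the dict literal file_patterns, in insertion order
def pvFilePatterns : List (String × List String) :=
  [("npm", ["package.json", "package-lock.json"]),
   ("yarn", ["yarn.lock"]),
   ("pip", ["requirements.txt", "setup.py", "pyproject.toml"]),
   ("maven", ["pom.xml"]),
   ("gradle", ["build.gradle", "build.gradle.kts"]),
   ("composer", ["composer.json"]),
   ("gem", ["Gemfile"]),
   ("cargo", ["Cargo.toml"]),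
   ("go", ["go.mod"])]

-- inner loop 'for pattern in patterns: if any(pattern in f for f in file_list): …; break'
def pvFirstHit (file_list : List String) : List String → Bool
  | [] => false
  | p :: ps => if file_list.any (fun f => PySem.Str.isIn p f) then true else pvFirstHit file_list ps

def detect_package_manager_from_files (file_list : List String) : List String :=
  pvFilePatterns.foldl
    (fun managers mp => if pvFirstHit file_list mp.2 then managers ++ [mp.1] else managers) []

-- ===== PORT B =====
def pvPatternManagerPairs : List (String × String) :=
  [("package.json", "npm"), ("package-lock.json", "npm"),
   ("yarn.lock", "yarn"),
   ("requirements.txt", "pip"), ("setup.py", "pip"), ("pyproject.toml", "pip"),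
   ("pom.xml", "maven"),
   ("build.gradle", "gradle"), ("build.gradle.kts", "gradle"),
   ("composer.json", "composer"),
   ("Gemfile", "gem"),
   ("Cargo.toml", "cargo"),
   ("go.mod", "go")]

def pvManagerOrder : List String :=
  ["npm", "yarn", "pip", "maven", "gradle", "composer", "gem", "cargo", "go"]

def pvDetected (file_list : List String) : PySem.Set String :=
  file_list.foldl
    (fun s f => pvPatternManagerPairs.foldl
      (fun s pm => if PySem.Str.isIn pm.1 f then PySem.Set.add s pm.2 else s) s)
    PySem.Set.empty

def detect_package_manager_from_files_alt (file_list : List String) : List String :=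
  pvManagerOrder.filter (fun m => PySem.Set.contains (pvDetected file_list) m)

-- ===== PRECONDITION & SPEC =====
def Spec_detect_package_manager_from_files (file_list : List String) (out : List String) : Prop := out = detect_package_manager_from_files_alt file_list
instance (file_list : List String) (out : List String) : Decidable (Spec_detect_package_manager_from_files file_list out) := by unfold Spec_detect_package_manager_from_files; infer_instance

-- ===== CLAIM (what is proved, stated in full; the proofs are below) =====
def Claim_equal_detect_package_manager_from_files : Prop := ∀ (file_list : List String), Dom_detect_package_manager_from_files file_list → Spec_detect_package_manager_from_files file_list (detect_package_manager_from_files file_list)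

-- ===== LEMMAS AND PROOFS =====

-- membership after the inner foldl over the pattern index, for one file
lemma mem_inner_foldl (f : String) (y : String) (pairs : List (String × String)) (s : PySem.Set String) :
    y ∈ pairs.foldl (fun s pm => if PySem.Str.isIn pm.1 f then PySem.Set.add s pm.2 else s) s ↔
      y ∈ s ∨ ∃ pm ∈ pairs, PySem.Str.isIn pm.1 f = true ∧ pm.2 = y := by
  induction pairs generalizing s with
  | nil => simp
  | cons pm rest ih =>
    simp only [List.foldl_cons, ih, List.mem_cons]
    split_ifs with h
    · simp [PySem.Set.mem_add]
      tauto
    · simp only [Bool.not_eq_true] at h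
      constructor
      · rintro (hs | ⟨q, hq, hc, he⟩)
        · exact Or.inl hs
        · exact Or.inr ⟨q, Or.inr hq, hc, he⟩
      · rintro (hs | ⟨q, (rfl | hq), hc, he⟩)
        · exact Or.inl hs
        · rw [h] at hc; exact absurd hc (by simp)
        · exact Or.inr ⟨q, hq, hc, he⟩

lemma mem_pvDetected (file_list : List String) (y : String) :
    y ∈ pvDetected file_list ↔
      ∃ f ∈ file_list, ∃ pm ∈ pvPatternManagerPairs, PySem.Str.isIn pm.1 f = true ∧ pm.2 = y := by
  have gen : ∀ (fl : List String) (s : PySem.Set String),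
      y ∈ fl.foldl (fun s f => pvPatternManagerPairs.foldl
        (fun s pm => if PySem.Str.isIn pm.1 f then PySem.Set.add s pm.2 else s) s) s ↔
      y ∈ s ∨ ∃ f ∈ fl, ∃ pm ∈ pvPatternManagerPairs, PySem.Str.isIn pm.1 f = true ∧ pm.2 = y := by
    intro fl
    induction fl with
    | nil => simp
    | cons f rest ih =>
      intro s
      simp only [List.foldl_cons, ih, mem_inner_foldl, List.mem_cons]
      constructor
      · rintro ((hs | ⟨q, hq, hc, he⟩) | ⟨g, hg, hrest⟩)
        · exact Or.inl hs
        · exact Or.inr ⟨f, Or.inl rfl, q, hq, hc, he⟩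
        · exact Or.inr ⟨g, Or.inr hg, hrest⟩
      · rintro (hs | ⟨g, (rfl | hg), hrest⟩)
        · exact Or.inl (Or.inl hs)
        · exact Or.inl (Or.inr hrest)
        · exact Or.inr ⟨g, hg, hrest⟩
  simpa [pvDetected, PySem.Set.empty] using gen file_list PySem.Set.empty

-- A's inner break-loop hits iff some pattern occurs in some file
lemma pvFirstHit_iff (file_list : List String) (ps : List String) :
    pvFirstHit file_list ps = true ↔ ∃ p ∈ ps, ∃ f ∈ file_list, PySem.Str.isIn p f = true := by
  induction ps with
  | nil => simp [pvFirstHit]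
  | cons p rest ih =>
    rw [pvFirstHit]
    split_ifs with hp
    · simp only [List.any_eq_true] at hp
      simp only [true_iff, List.mem_cons]
      exact ⟨p, Or.inl rfl, hp⟩
    · simp only [Bool.not_eq_true, List.any_eq_false] at hp
      rw [ih]
      constructor
      · rintro ⟨q, hq, hf⟩; exact ⟨q, List.mem_cons_of_mem _ hq, hf⟩
      · rintro ⟨q, hq, f, hf, hin⟩
        rcases List.mem_cons.mp hq with rfl | hq'
        · exact absurd hin (by simpa using hp f hf)
        · exact ⟨q, hq', f, hf, hin⟩

-- the per-manager bridge: A's early-break pattern scan equals B's set membership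
lemma hit_eq_contains (file_list : List String) (m : String) (ps : List String)
    (h : ∀ y, (∃ pm ∈ pvPatternManagerPairs, PySem.Str.isIn pm.1 y = true ∧ pm.2 = m) ↔
              ∃ p ∈ ps, PySem.Str.isIn p y = true) :
    pvFirstHit file_list ps = PySem.Set.contains (pvDetected file_list) m := by
  have hc : PySem.Set.contains (pvDetected file_list) m = true ↔ m ∈ pvDetected file_list := by
    simp [PySem.Set.contains]
  rw [Bool.eq_iff_iff, pvFirstHit_iff, hc, mem_pvDetected]
  constructor
  · rintro ⟨p, hp, f, hf, hin⟩
    exact ⟨f, hf, (h f).mpr ⟨p, hp, hin⟩⟩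
  · rintro ⟨f, hf, hpm⟩
    obtain ⟨p, hp, hin⟩ := (h f).mp hpm
    exact ⟨p, hp, f, hf, hin⟩

-- ===== VERDICT (by name: the statement is the Claim_ definition above) =====
theorem detect_package_manager_from_files_spec : Claim_equal_detect_package_manager_from_files := by
  intro file_list _
  unfold Spec_detect_package_manager_from_files
  have h1 := hit_eq_contains file_list "npm" ["package.json", "package-lock.json"]
    (by intro y; simp [pvPatternManagerPairs])
  have h2 := hit_eq_contains file_list "yarn" ["yarn.lock"]
    (by intro y; simp [pvPatternManagerPairs])
  have h3 := hit_eq_contains file_list "pip" ["requirements.txt", "setup.py", "pyproject.toml"]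
    (by intro y; simp [pvPatternManagerPairs])
  have h4 := hit_eq_contains file_list "maven" ["pom.xml"]
    (by intro y; simp [pvPatternManagerPairs])
  have h5 := hit_eq_contains file_list "gradle" ["build.gradle", "build.gradle.kts"]
    (by intro y; simp [pvPatternManagerPairs])
  have h6 := hit_eq_contains file_list "composer" ["composer.json"]
    (by intro y; simp [pvPatternManagerPairs])
  have h7 := hit_eq_contains file_list "gem" ["Gemfile"]
    (by intro y; simp [pvPatternManagerPairs])
  have h8 := hit_eq_contains file_list "cargo" ["Cargo.toml"]
    (by intro y; simp [pvPatternManagerPairs])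
  have h9 := hit_eq_contains file_list "go" ["go.mod"]
    (by intro y; simp [pvPatternManagerPairs])
  rw [detect_package_manager_from_files, detect_package_manager_from_files_alt,
    PySem.List.foldl_append_if (fun mp => pvFirstHit file_list mp.2) Prod.fst pvFilePatterns [],
    List.nil_append, show pvManagerOrder = pvFilePatterns.map Prod.fst from rfl, List.filter_map]
  refine congrArg (List.map Prod.fst) (List.filter_congr ?_)
  intro mp hmp
  fin_cases hmp
  exacts [h1, h2, h3, h4, h5, h6, h7, h8, h9]
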